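-- pv_equiv track=rewrite | github.com/YashIndane/codewars-solutions | python/Doubleton_number.py | doubleton
-- ===== SOURCE A (Python) =====
-- from collections import Counter
--
-- def doubleton(num):
--     while True:
--         w = str(num+1)
--         c = dict(Counter(w))
--         if len(c.keys()) == 2:
--             return num+1
--         else:
--             num+=1
-- ===== SOURCE B (Python) =====
-- def doubleton(num):
--     """Smallest number > num whose decimal digits take exactly two distinct values,
--     found by skipping whole blocks of numbers at once: as soon as a prefix of the
--     digit string already contains three distinct digits, no number sharing that
--     prefix qualifies, so jump straight past the block."""
--     n = num + 1
--     while True: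
--         s = str(n)
--         seen = set()
--         skip = False
--         for i, ch in enumerate(s):
--             if ch in seen:
--                 continue
--             if len(seen) == 2:
--                 # third distinct digit inside s[:i+1]: skip every number with this prefix
--                 k = len(s) - i - 1
--                 n = (n // 10 ** k + 1) * 10 ** k
--                 skip = True
--                 break
--             seen.add(ch)
--         if not skip:
--             if len(seen) == 2:
--                 return n
--             n += 1
-- ===== Notes on version B (the rewrite author's own statement) =====
-- stated objective: faster
-- what changed: Instead of testing every integer one by one, B jumps over the whole block of numbers sharing a prefix that already contains three distinct digits; Pre_ restricts to inputs whose candidates num+1 are non-negative (the kata's domain): on the excluded inputs the candidates are negative and A's answer hinges on its Counter over str(n) counting the '-' sign as one of the two distinct characters, an accident of the string-based test that specifies nothing (B's block-jump arithmetic happens to coincide on some of these and not on others).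
-- outside the precondition, e.g. on doubleton(-2): A returns -1, B returns -1; on doubleton(-1001): A returns -999, B returns -88
import Mathlib
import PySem

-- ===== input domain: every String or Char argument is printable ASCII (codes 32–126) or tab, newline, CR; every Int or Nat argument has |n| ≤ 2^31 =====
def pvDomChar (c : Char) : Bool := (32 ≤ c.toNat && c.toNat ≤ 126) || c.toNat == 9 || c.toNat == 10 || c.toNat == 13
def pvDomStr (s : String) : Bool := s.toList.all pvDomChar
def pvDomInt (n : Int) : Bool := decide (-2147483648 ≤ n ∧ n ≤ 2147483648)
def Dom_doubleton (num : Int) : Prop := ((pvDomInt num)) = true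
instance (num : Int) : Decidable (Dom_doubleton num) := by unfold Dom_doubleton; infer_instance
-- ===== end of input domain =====

-- B replaces A's one-by-one upward scan by prefix jumps over blocks of numbers whose
-- shared digit prefix already contains three distinct digits (objective: faster).

-- ===== PORT A =====
-- A's 'while True' loop, with fuel (10^10 steps always suffice on Pre_, proved below:
-- 10 and 10^10 are doubletons above every admitted num); the fuel-out value is unreachable on Pre_
def doubletonGo : Nat → Int → Int
  | 0, num => num + 1
  | f + 1, num =>
    let w := PySem.Int.toStr (num + 1)
    let c := PySem.Dict.counter w.toList      -- c = dict(Counter(w)): same keys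
    if (PySem.Dict.keys c).length == 2 then num + 1 else doubletonGo f (num + 1)

def doubleton (num : Int) : Int := doubletonGo (10 ^ 10) num

-- ===== PORT B =====
-- the inner 'for i, ch in enumerate(s)' loop of Source B with its break:
-- returns (seen, -1) if no break, (seen, i) if a third distinct char appeared at index i
def dblScan : List Char → Int → List Char → (List Char × Int)
  | [], _, seen => (seen, -1)
  | c :: rest, i, seen =>
    if seen.contains c then dblScan rest (i + 1) seen
    else if seen.length == 2 then (seen, i)
    else dblScan rest (i + 1) (seen ++ [c])

-- Source B's 'while True' loop (fuel as for A; every pass advances n by at least 1)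
def dblGo : Nat → Int → Int
  | 0, n => n
  | f + 1, n =>
    let w := PySem.Int.toChars n
    let r := dblScan w 0 []
    if r.2 < 0 then
      if r.1.length == 2 then n else dblGo f (n + 1)
    else
      let k := ((w.length : Int) - r.2 - 1).toNat             -- k ≥ 0 since r.2 < len(s)
      dblGo f ((PySem.Int.floordiv n (10 ^ k) + 1) * 10 ^ k)

def doubleton_alt (num : Int) : Int := dblGo (10 ^ 10) (num + 1)

-- ===== PRECONDITION & SPEC =====
-- Pre_ restricts to num ≥ -1 (non-negative candidates, the kata's domain): on num ≤ -2 the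
-- candidates A tests are negative and its answer hinges on Counter over str(n) counting the
-- '-' sign as one of the two distinct characters — an accident of the string-based test on a
-- corner the function does not specify; B's block-jump search does not reproduce it.
def Pre_doubleton (num : Int) : Prop := -1 ≤ num
instance (num : Int) : Decidable (Pre_doubleton num) := by unfold Pre_doubleton; infer_instance
def pvWitness_doubleton : Int := 7
def Spec_doubleton (num : Int) (out : Int) : Prop := out = doubleton_alt num
instance (num : Int) (out : Int) : Decidable (Spec_doubleton num out) := by unfold Spec_doubleton; infer_instance

-- ===== CLAIM (what is proved, stated in full; the proofs are below) =====
def Claim_equal_doubleton : Prop := ∀ (num : Int), Dom_doubleton num → Pre_doubleton num → Spec_doubleton num (doubleton num)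

-- ===== LEMMAS AND PROOFS =====

def bigE (m : Nat) : List Char := ((Nat.digits 10 m).map Nat.digitChar).reverse

theorem toDigitsCore_eq (f : Nat) : ∀ (m : Nat) (acc : List Char), 0 < m → m < 10 ^ f →
    Nat.toDigitsCore 10 f m acc = bigE m ++ acc := by
  induction f with
  | zero => intro m acc h1 h2; simp at h2; omega
  | succ f ih =>
    intro m acc h1 h2
    rw [Nat.toDigitsCore]
    by_cases h0 : m / 10 = 0
    · have hm10 : m < 10 := by omega
      simp only [h0, if_true]
      rw [bigE, Nat.digits_def' (by norm_num) h1]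
      have : m / 10 = 0 := h0
      rw [this]
      simp [Nat.mod_eq_of_lt hm10]
    · simp only [h0, if_false]
      rw [ih (m / 10) _ (by omega) (by
        have : m < 10 ^ f * 10 := by rw [← pow_succ]; exact h2
        omega)]
      rw [bigE, bigE, Nat.digits_def' (by norm_num) h1]
      simp

theorem toChars_pos (m : Nat) (h : 0 < m) : PySem.Int.toChars (m : Int) = bigE m := by
  rw [PySem.Int.toChars]
  have : ¬ ((m : Int) < 0) := by omega
  simp only [this, if_false, Int.toNat_natCast]
  rw [Nat.toDigits, toDigitsCore_eq (m+1) m [] h]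
  · simp
  · calc m < 10 ^ m := Nat.lt_pow_self (by norm_num)
      _ ≤ 10 ^ (m+1) := Nat.pow_le_pow_right (by norm_num) (by omega)

theorem digits_split (p s k : Nat) (hp : 0 < p) (hs : s < 10 ^ k) :
    Nat.digits 10 (p * 10 ^ k + s) =
      (Nat.digits 10 s ++ List.replicate (k - (Nat.digits 10 s).length) 0) ++ Nat.digits 10 p := by
  have hls : (Nat.digits 10 s).length ≤ k := (Nat.digits_length_le_iff (by norm_num) s).mpr hs
  have e1 : Nat.digits 10 (10 ^ (k - (Nat.digits 10 s).length) * p)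
      = List.replicate (k - (Nat.digits 10 s).length) 0 ++ Nat.digits 10 p :=
    Nat.digits_base_pow_mul (by norm_num) hp
  have e2 := Nat.digits_append_digits (b := 10) (n := s)
    (m := 10 ^ (k - (Nat.digits 10 s).length) * p) (by norm_num)
  rw [e1] at e2
  rw [List.append_assoc, e2]
  congr 1
  have : 10 ^ (Nat.digits 10 s).length * (10 ^ (k - (Nat.digits 10 s).length) * p) = 10 ^ k * p := by
    rw [← mul_assoc, ← pow_add]
    congr 2
    omega
  rw [this]; ring

theorem bigE_split (p s k : Nat) (hp : 0 < p) (hs : s < 10 ^ k) :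
    ∃ pad : List Char, bigE (p * 10 ^ k + s) = bigE p ++ pad ∧ pad.length = k := by
  have hls : (Nat.digits 10 s).length ≤ k := (Nat.digits_length_le_iff (by norm_num) s).mpr hs
  refine ⟨((Nat.digits 10 s ++ List.replicate (k - (Nat.digits 10 s).length) 0).map Nat.digitChar).reverse, ?_, ?_⟩
  · rw [bigE, digits_split p s k hp hs]
    simp [bigE]
  · simp; omega

theorem set_len_eq_card (l : List Char) : (PySem.Set.ofList l).length = l.toFinset.card := by
  have hn : (PySem.Set.ofList l).Nodup := PySem.Set.nodup_ofList l
  have : (PySem.Set.ofList l).toFinset = l.toFinset := by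
    ext x; simp [List.mem_toFinset, PySem.Set.mem_ofList]
  rw [← List.toFinset_card_of_nodup hn, this]

theorem card_le_of_subset {l₁ l₂ : List Char} (h : l₁ ⊆ l₂) : l₁.toFinset.card ≤ l₂.toFinset.card := by
  exact Finset.card_le_card (fun x hx => by
    simp only [List.mem_toFinset] at hx ⊢; exact h hx)

theorem gap_lemma (N k : Nat) (hk : k < (Nat.digits 10 N).length)
    (h3 : 3 ≤ ((bigE N).take ((bigE N).length - k)).toFinset.card) :
    ∀ M : Nat, N ≤ M → M < (N / 10 ^ k + 1) * 10 ^ k → 3 ≤ (bigE M).toFinset.card := by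
  intro M hNM hMlt
  have hpow : (0:Nat) < 10 ^ k := pow_pos (by norm_num : (0:Nat) < 10) k
  set P := N / 10 ^ k with hP
  have hPpos : 0 < P := by
    have : 10 ^ k ≤ N := (Nat.lt_digits_length_iff (by norm_num) N).mp hk
    exact Nat.div_pos this hpow
  have hMP : M / 10 ^ k = P := by
    have h1 : P * 10 ^ k ≤ N := Nat.div_mul_le_self N _
    have h2 : P ≤ M / 10 ^ k := Nat.le_div_iff_mul_le hpow |>.mpr (le_trans h1 hNM)
    have h3' : M / 10 ^ k < P + 1 := Nat.div_lt_iff_lt_mul hpow |>.mpr hMlt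
    omega
  obtain ⟨padN, hpadN, hlpadN⟩ := bigE_split P (N % 10 ^ k) k hPpos (Nat.mod_lt _ hpow)
  obtain ⟨padM, hpadM, hlpadM⟩ := bigE_split P (M % 10 ^ k) k hPpos (Nat.mod_lt _ hpow)
  have hNeq : N = P * 10 ^ k + N % 10 ^ k := by
    conv_lhs => rw [← Nat.div_add_mod N (10 ^ k)]
    rw [← hP, mul_comm]
  have hMeq : M = P * 10 ^ k + M % 10 ^ k := by
    conv_lhs => rw [← Nat.div_add_mod M (10 ^ k)]
    rw [hMP, mul_comm]
  have hNdec : bigE N = bigE P ++ padN := by rw [hNeq]; exact hpadN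
  have hMdec : bigE M = bigE P ++ padM := by rw [hMeq]; exact hpadM
  have htake : (bigE N).take ((bigE N).length - k) = bigE P := by
    rw [hNdec]
    have : (bigE P ++ padN).length - k = (bigE P).length := by simp [hlpadN]
    rw [this, List.take_left' rfl]
  rw [htake] at h3
  calc (3:Nat) ≤ (bigE P).toFinset.card := h3
    _ ≤ (bigE M).toFinset.card := card_le_of_subset (by rw [hMdec]; exact List.subset_append_left _ _)

theorem add_of_contains {s : List Char} {c : Char} (h : s.contains c = true) :
    PySem.Set.add s c = s := by simp [PySem.Set.add, PySem.Set.contains, List.contains_iff_mem.mp h]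

theorem add_of_not_contains {s : List Char} {c : Char} (h : ¬ s.contains c = true) :
    PySem.Set.add s c = s ++ [c] := by
  have : c ∉ s := by simpa [List.contains_iff_mem] using h
  simp [PySem.Set.add, PySem.Set.contains, this]

theorem len_le_foldl_add (cs : List Char) : ∀ s : List Char,
    s.length ≤ (cs.foldl PySem.Set.add s).length := by
  induction cs with
  | nil => intro s; simp
  | cons c rest ih =>
    intro s
    simp only [List.foldl_cons]
    refine le_trans ?_ (ih (PySem.Set.add s c))
    by_cases h : s.contains c = true
    · rw [add_of_contains h]
    · rw [add_of_not_contains h]; simp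

theorem scan_small (cs : List Char) : ∀ (seen : List Char) (i : Int),
    seen.length ≤ 2 → (cs.foldl PySem.Set.add seen).length ≤ 2 →
    dblScan cs i seen = (cs.foldl PySem.Set.add seen, -1) := by
  induction cs with
  | nil => intro seen i _ _; rfl
  | cons c rest ih =>
    intro seen i h1 h2
    rw [dblScan]
    by_cases hc : seen.contains c = true
    · simp only [hc, if_true]
      rw [ih seen (i+1) h1 (by simpa [add_of_contains hc] using h2)]
      simp [add_of_contains hc]
    · simp only [hc]
      simp only [List.foldl_cons, add_of_not_contains hc] at h2
      have hlen : seen.length + 1 ≤ 2 := by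
        have := len_le_foldl_add rest (seen ++ [c])
        simp at this; omega
      have : (seen.length == 2) = false := by simp; omega
      simp only [this, if_false, Bool.false_eq_true]
      rw [ih (seen ++ [c]) (i+1) (by simpa using hlen) h2]
      simp [add_of_not_contains hc]

theorem scan_big (cs : List Char) : ∀ (pre : List Char),
    (PySem.Set.ofList pre).length ≤ 2 → 3 ≤ (PySem.Set.ofList (pre ++ cs)).length →
    ∃ j : Nat, pre.length ≤ j ∧ j < pre.length + cs.length ∧
      (dblScan cs (pre.length : Int) (PySem.Set.ofList pre)).2 = (j : Int) ∧
      3 ≤ ((pre ++ cs).take (j + 1)).toFinset.card := by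
  induction cs with
  | nil =>
    intro pre h1 h2
    simp at h2
    omega
  | cons c rest ih =>
    intro pre h1 h2
    have hof : ∀ l : List Char, PySem.Set.ofList (pre ++ l) =
        l.foldl PySem.Set.add (PySem.Set.ofList pre) := by
      intro l
      rw [PySem.Set.ofList_eq_foldl, PySem.Set.ofList_eq_foldl, List.foldl_append]
    have hsplit : pre ++ c :: rest = (pre ++ [c]) ++ rest := by simp
    have hlen1 : (((pre ++ [c]).length : Nat) : Int) = (pre.length : Int) + 1 := by
      simp
    rw [dblScan]
    by_cases hc : List.contains (PySem.Set.ofList pre) c = true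
    · simp only [hc, if_true]
      have hpc : PySem.Set.ofList (pre ++ [c]) = PySem.Set.ofList pre := by
        rw [hof [c]]; simp [add_of_contains hc]
      obtain ⟨j, hj1, hj2, hj3, hj4⟩ := ih (pre ++ [c])
        (by rw [hpc]; exact h1)
        (by rw [← hsplit]; exact h2)
      rw [hlen1, hpc] at hj3
      refine ⟨j, by simp at hj1; omega, by simp at hj2 ⊢; omega, hj3, ?_⟩
      rw [hsplit]
      exact hj4
    · simp only [hc]
      by_cases h2l : ((PySem.Set.ofList pre).length == 2) = true
      · simp only [h2l, if_true]
        refine ⟨pre.length, le_refl _, by simp, rfl, ?_⟩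
        have htake : (pre ++ c :: rest).take (pre.length + 1) = pre ++ [c] := by
          rw [List.take_append]
          simp
        rw [htake]
        have : 3 ≤ (PySem.Set.ofList (pre ++ [c])).length := by
          rw [hof [c]]
          simp only [List.foldl_cons, List.foldl_nil, add_of_not_contains hc]
          simp at h2l ⊢; omega
        rw [set_len_eq_card] at this
        exact this
      · simp only [h2l, if_false, Bool.false_eq_true]
        have hpc : PySem.Set.ofList (pre ++ [c]) = PySem.Set.ofList pre ++ [c] := by
          rw [hof [c]]; simp [add_of_not_contains hc]
        obtain ⟨j, hj1, hj2, hj3, hj4⟩ := ih (pre ++ [c])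
          (by rw [hpc]; simp at h2l ⊢; omega)
          (by rw [← hsplit]; exact h2)
        rw [hlen1, hpc] at hj3
        refine ⟨j, by simp at hj1; omega, by simp at hj2 ⊢; omega, hj3, ?_⟩
        rw [hsplit]
        exact hj4

def Dcnt (n : Int) : Nat := (PySem.Int.toChars n).toFinset.card

theorem Dtest_iff (n : Int) :
    ((PySem.Dict.counter (PySem.Int.toStr n).toList).keys.length == 2) = true ↔ Dcnt n = 2 := by
  rw [PySem.Dict.keys_counter, PySem.Int.toList_toStr, set_len_eq_card]
  simp [Dcnt]

theorem Ago (f : Nat) : ∀ (num t : Int), Dcnt t = 2 → num < t → t ≤ num + f →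
    (∀ m : Int, num < m → m < t → Dcnt m ≠ 2) → doubletonGo f num = t := by
  induction f with
  | zero => intro num t h1 h2 h3 h4; omega
  | succ f ih =>
    intro num t h1 h2 h3 h4
    rw [doubletonGo]
    by_cases h : ((PySem.Dict.counter (PySem.Int.toStr (num+1)).toList).keys.length == 2) = true
    · simp only [h, if_true]
      rcases lt_or_eq_of_le (by omega : num + 1 ≤ t) with hlt | heq
      · exact absurd ((Dtest_iff (num+1)).mp h) (h4 (num+1) (by omega) hlt)
      · exact heq
    · simp only [h, if_false, Bool.false_eq_true]
      have hne : t ≠ num + 1 := by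
        intro he; apply h; rw [he] at h1; exact (Dtest_iff (num+1)).mpr h1
      exact ih (num+1) t h1 (by omega) (by omega) (fun m hm1 hm2 => h4 m (by omega) hm2)

theorem length_bigE (m : Nat) : (bigE m).length = (Nat.digits 10 m).length := by
  simp [bigE]

theorem Bgo (f : Nat) : ∀ (n t : Int), 0 ≤ n → Dcnt t = 2 → n ≤ t → t ≤ n + f →
    (∀ m : Int, n ≤ m → m < t → Dcnt m ≠ 2) → dblGo f n = t := by
  induction f with
  | zero =>
    intro n t h0 h1 h2 h3 h4
    have : t = n := by omega
    rw [this, dblGo]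
  | succ f ih =>
    intro n t h0 h1 h2 h3 h4
    rw [dblGo]
    have hemp : (PySem.Set.ofList ([] : List Char)) = ([] : List Char) := rfl
    by_cases hsm : ((PySem.Set.ofList (PySem.Int.toChars n)).length) ≤ 2
    · -- at most 2 distinct characters: no jump
      have hs := scan_small (PySem.Int.toChars n) [] 0 (by simp)
        (by rw [← PySem.Set.ofList_eq_foldl]; exact hsm)
      rw [← PySem.Set.ofList_eq_foldl] at hs
      simp only [hs]
      norm_num
      rw [set_len_eq_card]
      by_cases hD : Dcnt n = 2
      · have ht : t = n := by
          rcases lt_or_eq_of_le h2 with hlt | he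
          · exact absurd hD (h4 n (le_refl n) hlt)
          · omega
        simp only [Dcnt] at hD
        simp [hD, ht]
      · rw [if_neg (by simpa [Dcnt] using hD : ¬ (PySem.Int.toChars n).toFinset.card = 2)]
        have htn : t ≠ n := fun he => hD (he ▸ h1)
        exact ih (n+1) t (by omega) h1 (by omega) (by push_cast at h3 ⊢; omega)
          (fun m hm1 hm2 => h4 m (by omega) hm2)
    · -- a third distinct character exists: jump
      have hbg : 3 ≤ (PySem.Set.ofList (PySem.Int.toChars n)).length := by omega
      obtain ⟨j, hj0, hjlt, hj3, hj4⟩ := scan_big (PySem.Int.toChars n) []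
        (by simp [hemp]) (by simpa using hbg)
      simp only [List.length_nil, Nat.cast_zero, hemp] at hj3 hjlt
      simp only [List.nil_append] at hj4
      have hjw : j < (PySem.Int.toChars n).length := by omega
      have hnotneg : ¬ ((dblScan (PySem.Int.toChars n) 0 []).2 < 0) := by
        rw [hj3]; omega
      simp only [hnotneg, if_false]
      have hw3 : 3 ≤ (PySem.Int.toChars n).length := by
        have h1' : 3 ≤ (List.take (j+1) (PySem.Int.toChars n)).toFinset.card := hj4
        have h2' : (List.take (j+1) (PySem.Int.toChars n)).toFinset.card
            ≤ (List.take (j+1) (PySem.Int.toChars n)).length := List.toFinset_card_le _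
        have h3' : (List.take (j+1) (PySem.Int.toChars n)).length ≤ j + 1 := by
          simp [List.length_take]
        omega
      have hnpos : 0 < n := by
        rcases lt_or_eq_of_le h0 with h | h
        · exact h
        · exfalso
          rw [← h] at hw3
          have : PySem.Int.toChars 0 = ['0'] := rfl
          rw [this] at hw3
          simp at hw3
      set N : Nat := n.toNat with hN
      have hnN : n = (N : Int) := by omega
      have hwE : PySem.Int.toChars n = bigE N := by rw [hnN]; exact toChars_pos N (by omega)
      set k' : Nat := (((PySem.Int.toChars n).length : Int) - (dblScan (PySem.Int.toChars n) 0 []).2 - 1).toNat with hk'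
      have hk'eq : k' = (PySem.Int.toChars n).length - 1 - j := by
        rw [hk', hj3]; omega
      have hdiglen : (Nat.digits 10 N).length = (PySem.Int.toChars n).length := by
        rw [hwE]; exact (length_bigE N).symm
      have hkd : k' < (Nat.digits 10 N).length := by omega
      have h3' : 3 ≤ ((bigE N).take ((bigE N).length - k')).toFinset.card := by
        have : (bigE N).length - k' = j + 1 := by
          rw [← hwE]; omega
        rw [this, ← hwE]; exact hj4
      have hgap := gap_lemma N k' hkd h3'
      have hpowpos : (0:Int) < 10 ^ k' := by positivity
      have hn'eq : (PySem.Int.floordiv n (10 ^ k') + 1) * 10 ^ k'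
          = (((N / 10 ^ k' + 1) * 10 ^ k' : Nat) : Int) := by
        rw [PySem.Int.floordiv_eq_ediv_of_pos hpowpos, hnN]
        push_cast [Int.natCast_ediv]
        ring
      set n' : Int := (PySem.Int.floordiv n (10 ^ k') + 1) * 10 ^ k' with hn'
      have hgapI : ∀ m : Int, n ≤ m → m < n' → Dcnt m ≠ 2 := by
        intro m hm1 hm2
        have hmpos : 0 < m := lt_of_lt_of_le hnpos hm1
        have hDm : Dcnt m = (bigE m.toNat).toFinset.card := by
          rw [Dcnt]
          conv_lhs => rw [show m = ((m.toNat : Nat) : Int) by omega]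
          rw [toChars_pos _ (by omega : 0 < m.toNat)]
        have := hgap m.toNat (by omega)
          (by rw [hn'eq] at hm2; omega)
        omega
      have hlt' : n < n' := by
        have hmod := Nat.div_add_mod N (10 ^ k')
        have hmlt : N % 10 ^ k' < 10 ^ k' := Nat.mod_lt _ (by positivity)
        have : N < (N / 10 ^ k' + 1) * 10 ^ k' := by
          calc N = 10 ^ k' * (N / 10 ^ k') + N % 10 ^ k' := hmod.symm
            _ < 10 ^ k' * (N / 10 ^ k') + 10 ^ k' := by omega
            _ = (N / 10 ^ k' + 1) * 10 ^ k' := by ring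
        rw [hn'eq, hnN]
        exact_mod_cast this
      have htn' : n' ≤ t := by
        by_contra hcon
        exact hgapI t h2 (by omega) h1
      exact ih n' t (by omega) h1 htn' (by push_cast at h3 ⊢; omega)
        (fun m hm1 hm2 => h4 m (by omega) hm2)

theorem pow10cast : (((10:Nat) ^ 10 : Nat) : Int) = 10000000000 := by norm_num

theorem D_ten_pow : Dcnt ((10:Int) ^ 10) = 2 := by decide

theorem D_ten : Dcnt (10:Int) = 2 := by decide

theorem doubleton_eq_alt : ∀ (num : Int), Dom_doubleton num → Pre_doubleton num →
    doubleton num = doubleton_alt num := by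
  intro num hdom hpre
  have hdom' : -2147483648 ≤ num ∧ num ≤ 2147483648 := by
    simpa [Dom_doubleton, pvDomInt] using hdom
  have hpre' : -1 ≤ num := hpre
  rw [doubleton, doubleton_alt]
  -- the least doubleton above num exists
  obtain ⟨t, ⟨htgt, htD⟩, htmin⟩ := Int.exists_least_of_bdd
    (P := fun z => num < z ∧ Dcnt z = 2) ⟨num + 1, fun z hz => by omega⟩
    ⟨(10:Int) ^ 10, by norm_num; omega, D_ten_pow⟩
  have htub : t ≤ 10000000000 := by
    have := htmin _ ⟨(by norm_num; omega : num < (10:Int) ^ 10), D_ten_pow⟩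
    norm_num at this
    exact this
  have hmin' : ∀ m : Int, num < m → m < t → Dcnt m ≠ 2 := by
    intro m hm1 hm2 hDm
    have := htmin m ⟨hm1, hDm⟩
    omega
  rw [Ago (10 ^ 10) num t htD htgt (by
    rw [pow10cast]
    by_cases hnum0 : num < 10
    · have := htmin _ ⟨hnum0, D_ten⟩; omega
    · omega) hmin']
  rw [Bgo (10 ^ 10) (num + 1) t (by omega) htD (by omega) (by rw [pow10cast]; omega)
    (fun m hm1 hm2 => hmin' m (by omega) hm2)]

-- ===== VERDICT (by name: the statement is the Claim_ definition above) =====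
theorem doubleton_spec : Claim_equal_doubleton := by
  intro num hdom hpre
  unfold Spec_doubleton
  exact doubleton_eq_alt num hdom hpre
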